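-- pv_equiv track=rewrite | github.com/srijith-reddy/M.I.R.A | mira/core/domain_trust.py | page_type_bonus
-- ===== SOURCE A (Python) =====
-- _FORUM_HINTS = ("forum.", "/forum", "/forums/", "/community/", "/thread/", "/threads/")
--
-- _VIDEO_HINTS = ("/video/", "youtube.com", "youtu.be", "v.redd.it")
--
-- def page_type_bonus(url: str, title: str, intent: str) -> int:
--     """Apply bonuses/penalties based on URL/title patterns for a given intent."""
--     t = (title or "").lower()
--     u = (url or "").lower()
--     bonus = 0
--     if intent == "sports_stats":
--         if "boxscore" in u or "box score" in t: bonus += 6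
--         if "gameid=" in u or "/game/" in u:    bonus += 3
--         if "final score" in t or "recap" in u: bonus += 2
--     if intent == "price":
--         if any(k in t for k in ("price", "buy", "from ₹", "from $", "deal")): bonus += 2
--         if any(k in u for k in ("/dp/", "/product/")): bonus += 2
--     if intent in ("news", "finance"):
--         if any(k in u for k in ("/markets/", "/business/", "/technology/")): bonus += 1
--         if any(k in t for k in ("earnings", "guidance", "downgrade", "upgrade", "ipo", "acquires")): bonus += 1
--     if any(v in u for v in _VIDEO_HINTS): bonus -= 3
--     if any(h in u for h in _FORUM_HINTS): bonus -= 4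
--     return bonus
-- ===== SOURCE B (Python) =====
-- # Rule-table re-implementation: each rule = (applicable intents or None, (field, pattern) probes, bonus).
-- _RULES = (
--     (("sports_stats",), (("u", "boxscore"), ("t", "box score")), 6),
--     (("sports_stats",), (("u", "gameid="), ("u", "/game/")), 3),
--     (("sports_stats",), (("t", "final score"), ("u", "recap")), 2),
--     (("price",), (("t", "price"), ("t", "buy"), ("t", "from ₹"), ("t", "from $"), ("t", "deal")), 2),
--     (("price",), (("u", "/dp/"), ("u", "/product/")), 2),
--     (("news", "finance"), (("u", "/markets/"), ("u", "/business/"), ("u", "/technology/")), 1),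
--     (("news", "finance"), (("t", "earnings"), ("t", "guidance"), ("t", "downgrade"),
--                            ("t", "upgrade"), ("t", "ipo"), ("t", "acquires")), 1),
--     (None, (("u", "/video/"), ("u", "youtube.com"), ("u", "youtu.be"), ("u", "v.redd.it")), -3),
--     (None, (("u", "forum."), ("u", "/forum"), ("u", "/forums/"), ("u", "/community/"),
--             ("u", "/thread/"), ("u", "/threads/")), -4),
-- )
--
-- def page_type_bonus(url: str, title: str, intent: str) -> int:
--     u = url.lower()
--     t = title.lower()
--     total = 0
--     for intents, probes, bonus in _RULES:
--         if intents is not None and intent not in intents: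
--             continue
--         if any(pat in (u if field == "u" else t) for field, pat in probes):
--             total += bonus
--     return total
-- ===== Notes on version B (the rewrite author's own statement) =====
-- stated objective: idiomatic
-- what changed: Replaces A's hard-coded chain of per-intent if-blocks with a single declarative rule table (intent set, (field,pattern) probes, bonus) scanned by one generic loop.
import Mathlib
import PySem

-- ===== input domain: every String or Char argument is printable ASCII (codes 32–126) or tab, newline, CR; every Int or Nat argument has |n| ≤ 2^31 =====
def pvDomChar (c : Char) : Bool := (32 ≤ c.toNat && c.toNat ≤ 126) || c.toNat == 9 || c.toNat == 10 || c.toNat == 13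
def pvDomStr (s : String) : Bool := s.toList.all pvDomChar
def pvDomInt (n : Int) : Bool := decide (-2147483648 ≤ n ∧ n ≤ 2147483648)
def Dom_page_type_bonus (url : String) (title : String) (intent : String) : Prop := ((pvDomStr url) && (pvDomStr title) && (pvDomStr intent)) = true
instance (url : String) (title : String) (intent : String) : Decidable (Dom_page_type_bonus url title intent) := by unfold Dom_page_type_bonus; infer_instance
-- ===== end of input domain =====

-- B replaces A's hard-coded per-intent if-chains with a declarative rule table scanned by one generic loop (objective: idiomatic; same cost).

-- ===== PORT A =====
def page_type_bonus (url : String) (title : String) (intent : String) : Int :=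
  -- t = (title or "").lower(); u = (url or "").lower()
  let t := PySem.Str.lower (if title == "" then "" else title)
  let u := PySem.Str.lower (if url == "" then "" else url)
  let bonus : Int := 0
  let bonus := if intent == "sports_stats" then
      let bonus := if PySem.Str.isIn "boxscore" u || PySem.Str.isIn "box score" t then bonus + 6 else bonus
      let bonus := if PySem.Str.isIn "gameid=" u || PySem.Str.isIn "/game/" u then bonus + 3 else bonus
      if PySem.Str.isIn "final score" t || PySem.Str.isIn "recap" u then bonus + 2 else bonus
    else bonus
  let bonus := if intent == "price" then
      let bonus := if ["price", "buy", "from ₹", "from $", "deal"].any (fun k => PySem.Str.isIn k t) then bonus + 2 else bonus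
      if ["/dp/", "/product/"].any (fun k => PySem.Str.isIn k u) then bonus + 2 else bonus
    else bonus
  let bonus := if intent == "news" || intent == "finance" then
      let bonus := if ["/markets/", "/business/", "/technology/"].any (fun k => PySem.Str.isIn k u) then bonus + 1 else bonus
      if ["earnings", "guidance", "downgrade", "upgrade", "ipo", "acquires"].any (fun k => PySem.Str.isIn k t) then bonus + 1 else bonus
    else bonus
  let bonus := if ["/video/", "youtube.com", "youtu.be", "v.redd.it"].any (fun v => PySem.Str.isIn v u) then bonus - 3 else bonus
  if ["forum.", "/forum", "/forums/", "/community/", "/thread/", "/threads/"].any (fun h => PySem.Str.isIn h u) then bonus - 4 else bonus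

-- ===== PORT B =====
-- rule table: (applicable intents or none, (field, pattern) probes with true = url, bonus)
def pvRules : List (Option (List String) × List (Bool × String) × Int) :=
  [ (some ["sports_stats"], [(true, "boxscore"), (false, "box score")], 6),
    (some ["sports_stats"], [(true, "gameid="), (true, "/game/")], 3),
    (some ["sports_stats"], [(false, "final score"), (true, "recap")], 2),
    (some ["price"], [(false, "price"), (false, "buy"), (false, "from ₹"), (false, "from $"), (false, "deal")], 2),
    (some ["price"], [(true, "/dp/"), (true, "/product/")], 2),
    (some ["news", "finance"], [(true, "/markets/"), (true, "/business/"), (true, "/technology/")], 1),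
    (some ["news", "finance"], [(false, "earnings"), (false, "guidance"), (false, "downgrade"), (false, "upgrade"), (false, "ipo"), (false, "acquires")], 1),
    (none, [(true, "/video/"), (true, "youtube.com"), (true, "youtu.be"), (true, "v.redd.it")], -3),
    (none, [(true, "forum."), (true, "/forum"), (true, "/forums/"), (true, "/community/"), (true, "/thread/"), (true, "/threads/")], -4) ]

def page_type_bonus_alt (url : String) (title : String) (intent : String) : Int :=
  let u := PySem.Str.lower url
  let t := PySem.Str.lower title
  pvRules.foldl (fun total r =>
    let applies := match r.1 with
      | none => true
      | some is => is.any (fun s => intent == s)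
    let hit := r.2.1.any (fun p => PySem.Str.isIn p.2 (if p.1 then u else t))
    if applies && hit then total + r.2.2 else total) 0

-- ===== PRECONDITION & SPEC =====
def Spec_page_type_bonus (url : String) (title : String) (intent : String) (out : Int) : Prop := out = page_type_bonus_alt url title intent
instance (url : String) (title : String) (intent : String) (out : Int) : Decidable (Spec_page_type_bonus url title intent out) := by unfold Spec_page_type_bonus; infer_instance

-- ===== CLAIM (what is proved, stated in full; the proofs are below) =====
def Claim_equal_page_type_bonus : Prop := ∀ (url : String) (title : String) (intent : String), Dom_page_type_bonus url title intent → Spec_page_type_bonus url title intent (page_type_bonus url title intent)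

-- ===== LEMMAS AND PROOFS =====

theorem pv_if_add (b : Bool) (x k : Int) :
    (if b = true then x + k else x) = x + (if b = true then k else 0) := by
  cases b <;> simp

theorem pv_if_sub (b : Bool) (x k : Int) :
    (if b = true then x - k else x) = x + (if b = true then -k else 0) := by
  cases b <;> simp [sub_eq_add_neg]

theorem pv_group3 (b : Bool) (x p q r : Int) :
    (if b = true then x + p + q + r else x)
      = x + (if b = true then p else 0) + (if b = true then q else 0) + (if b = true then r else 0) := by
  cases b <;> simp

theorem pv_group2 (b : Bool) (x p q : Int) :
    (if b = true then x + p + q else x)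
      = x + (if b = true then p else 0) + (if b = true then q else 0) := by
  cases b <;> simp

theorem pv_and_ite (b c : Bool) (k : Int) :
    (if b = true then (if c = true then k else 0) else 0) = if (b && c) = true then k else 0 := by
  cases b <;> simp

-- ===== VERDICT (by name: the statement is the Claim_ definition above) =====
set_option maxHeartbeats 1000000 in
theorem page_type_bonus_spec : Claim_equal_page_type_bonus := by
  intro url title intent hd
  unfold Spec_page_type_bonus page_type_bonus page_type_bonus_alt pvRules
  have ht : (if title == "" then "" else title) = title := by
    by_cases h : title = "" <;> simp [h]
  have hu : (if url == "" then "" else url) = url := by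
    by_cases h : url = "" <;> simp [h]
  rw [ht, hu]
  simp only [List.foldl, List.any_cons, List.any_nil, Bool.or_false, if_true, Bool.false_eq_true, if_false]

  simp only [pv_if_add, pv_if_sub, pv_group3, pv_group2, pv_and_ite, Bool.true_and]
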